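-- pv_equiv track=rewrite | github.com/C-S-I-FIIT/egis | egis-app/netbox_client.py | _get_primary_contact
-- ===== SOURCE A (Python) =====
-- def _get_primary_contact(contacts):
--     """
--     Get the primary contact from a list of contacts.
--
--     Args:
--         contacts: A list of contact dictionaries
--
--     Returns:
--         dict: The primary contact, or the first contact if no primary is designated
--     """
--     if not contacts:
--         return None
--
--     # First try to find contact explicitly marked as primary
--     for contact in contacts:
--         if contact.get('priority') == 'primary':
--             return contact
--
--     # If no explicit primary, find one with primary role
--     for contact in contacts:
--         if contact.get('role', '').lower() == 'primary':
--             return contact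
--
--     # Default to first contact
--     return contacts[0]
-- ===== SOURCE B (Python) =====
-- def _get_primary_contact(contacts):
--     if not contacts:
--         return None
--     fallback = None
--     for contact in contacts:
--         if contact.get('priority') == 'primary':
--             return contact
--         if fallback is None and contact.get('role', '').lower() == 'primary':
--             fallback = contact
--     return fallback if fallback is not None else contacts[0]
-- ===== Notes on version B (the rewrite author's own statement) =====
-- stated objective: alternative
-- what changed: Replaces A's two full passes (one for priority=='primary', a second for role.lower()=='primary') with a single pass that returns immediately on a priority match and keeps the first role match as a running fallback.
import Mathlib
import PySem

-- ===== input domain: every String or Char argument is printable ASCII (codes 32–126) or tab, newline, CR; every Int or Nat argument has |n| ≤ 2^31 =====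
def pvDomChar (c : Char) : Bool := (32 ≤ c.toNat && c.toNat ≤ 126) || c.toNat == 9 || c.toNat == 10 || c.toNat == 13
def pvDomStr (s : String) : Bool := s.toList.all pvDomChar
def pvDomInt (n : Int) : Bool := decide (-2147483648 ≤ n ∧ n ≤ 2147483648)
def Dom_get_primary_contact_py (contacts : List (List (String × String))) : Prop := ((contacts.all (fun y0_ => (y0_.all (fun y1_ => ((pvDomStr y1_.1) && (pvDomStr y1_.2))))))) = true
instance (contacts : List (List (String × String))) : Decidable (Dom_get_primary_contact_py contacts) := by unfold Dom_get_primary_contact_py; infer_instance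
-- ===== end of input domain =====

-- B merges A's two scans into one pass that returns on a priority match and keeps the first role match as a running fallback; objective: alternative decomposition (same cost).


-- ===== PORT A =====
-- contact.get('priority') == 'primary'
def pvHasPrio (c : List (String × String)) : Bool :=
  (PySem.Dict.mk c).get? "priority" == some "primary"

-- contact.get('role', '').lower() == 'primary'
def pvHasRole (c : List (String × String)) : Bool :=
  PySem.Str.lower ((PySem.Dict.mk c).getD "role" "") == "primary"

-- A: empty guard; first scan for priority; second scan for role; else contacts[0]
def get_primary_contact_py (contacts : List (List (String × String))) : Option (List (String × String)) :=
  if contacts = [] then none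
  else
    match contacts.find? pvHasPrio with
    | some c => some c
    | none =>
      match contacts.find? pvHasRole with
      | some c => some c
      | none => PySem.List.pyGet? contacts 0

-- ===== PORT B =====
-- single pass: early return on priority match, first role match kept as fallback
def pvAltLoop (fallback : Option (List (String × String))) :
    List (List (String × String)) → Option (List (String × String))
  | [] => fallback
  | c :: rest =>
    if pvHasPrio c then some c
    else pvAltLoop (if fallback = none ∧ pvHasRole c then some c else fallback) rest

def get_primary_contact_py_alt (contacts : List (List (String × String))) : Option (List (String × String)) :=
  if contacts = [] then none
  else
    match pvAltLoop none contacts with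
    | some c => some c
    | none => PySem.List.pyGet? contacts 0

-- ===== PRECONDITION & SPEC =====
def Spec_get_primary_contact_py (contacts : List (List (String × String))) (out : Option (List (String × String))) : Prop := out = get_primary_contact_py_alt contacts
instance (contacts : List (List (String × String))) (out : Option (List (String × String))) : Decidable (Spec_get_primary_contact_py contacts out) := by unfold Spec_get_primary_contact_py; infer_instance

-- ===== CLAIM (what is proved, stated in full; the proofs are below) =====
def Claim_equal_get_primary_contact_py : Prop := ∀ (contacts : List (List (String × String))), Dom_get_primary_contact_py contacts → Spec_get_primary_contact_py contacts (get_primary_contact_py contacts)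

-- ===== LEMMAS AND PROOFS =====
-- The single pass equals: first priority match, else fallback-or-first-role-match.
theorem pvAltLoop_eq (cs : List (List (String × String)))
    (fb : Option (List (String × String))) :
    pvAltLoop fb cs =
      match cs.find? pvHasPrio with
      | some c => some c
      | none => fb.or (cs.find? pvHasRole) := by
  induction cs generalizing fb with
  | nil => simp [pvAltLoop]
  | cons c rest ih =>
    by_cases hp : pvHasPrio c
    · simp [pvAltLoop, hp, List.find?]
    · simp only [pvAltLoop, hp, if_neg, List.find?, Bool.not_eq_true] at *
      rw [ih]
      cases hfp : rest.find? pvHasPrio with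
      | some d => simp [hp, hfp]
      | none =>
        cases fb with
        | some v => simp [hp, hfp]
        | none =>
          by_cases hr : pvHasRole c <;> simp [hp, hr, hfp]

theorem get_primary_contact_py_spec : Claim_equal_get_primary_contact_py := by
  intro contacts _
  unfold Spec_get_primary_contact_py get_primary_contact_py get_primary_contact_py_alt
  rw [pvAltLoop_eq]
  cases contacts.find? pvHasPrio with
  | some c => simp
  | none => cases contacts.find? pvHasRole with
    | some c => simp
    | none => simp
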